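-- pv_equiv track=rewrite | github.com/MrBrantCode/unitest_baseline | mut_generate/mist_train_cf/cf_51319/solution.py | find_nth_non_repeating_char
-- ===== SOURCE A (Python) =====
-- def find_nth_non_repeating_char(input_str, n):
--     """
--     This function finds the nth non-repeating character in a given string.
--
--     Args:
--     input_str (str): The input string.
--     n (int): The position of the non-repeating character to find.
--
--     Returns:
--     str: The nth non-repeating character if found, otherwise "None".
--     """
--     # Create a dictionary for frequency count of every character
--     count = {}
--     for char in input_str:
--         if char in count:
--             count[char] += 1
--         else:
--             count[char] = 1
--
--     # Iterate over the dictionary to find the nth non-repeating character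
--     non_repeating_chars = [char for char, freq in count.items() if freq == 1]
--     if len(non_repeating_chars) < n:
--         return "None"
--     else:
--         return non_repeating_chars[n-1]
-- ===== SOURCE B (Python) =====
-- def find_nth_non_repeating_char(input_str, n):
--     # Iterative elimination: consume the string front-to-back; a repeated head
--     # character is purged (all its copies removed from the remainder), a unique
--     # head is recorded. No frequency table is ever built.
--     uniq = []
--     s = input_str
--     while s:
--         c, rest = s[0], s[1:]
--         if c in rest:
--             s = rest.replace(c, '')
--         else:
--             uniq.append(c)
--             s = rest
--     if len(uniq) < n:
--         return "None"
--     return uniq[n - 1]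
-- ===== Notes on version B (the rewrite author's own statement) =====
-- stated objective: alternative
-- what changed: Replaced the frequency-dictionary pass plus items() filtering with an iterative elimination loop over a shrinking string: the head character is either purged together with all its later copies (if repeated) or appended to the result (if unique), so no count table exists at any point; the length guard and n-1 indexing are unchanged.
import Mathlib
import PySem

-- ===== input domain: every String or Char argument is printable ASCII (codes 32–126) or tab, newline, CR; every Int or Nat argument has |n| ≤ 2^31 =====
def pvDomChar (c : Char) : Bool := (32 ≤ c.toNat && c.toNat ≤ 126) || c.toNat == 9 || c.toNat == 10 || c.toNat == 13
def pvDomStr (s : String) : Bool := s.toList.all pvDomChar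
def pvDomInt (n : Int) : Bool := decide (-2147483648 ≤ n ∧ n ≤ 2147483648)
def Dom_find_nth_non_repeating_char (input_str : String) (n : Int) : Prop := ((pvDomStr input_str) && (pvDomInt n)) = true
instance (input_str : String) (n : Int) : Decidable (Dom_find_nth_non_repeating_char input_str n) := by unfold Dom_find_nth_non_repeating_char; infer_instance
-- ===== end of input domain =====

-- B replaces A's frequency dictionary with an iterative elimination loop over a shrinking
-- string (purge a repeated head with all its copies, or record a unique head); guard and
-- n-1 indexing are unchanged, equivalence is exact. Pre_ excludes only the inputs where
-- both Pythons raise IndexError.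


-- ===== PORT A =====
def find_nth_non_repeating_char (input_str : String) (n : Int) : String :=
  let count : PySem.Dict Char Int :=
    input_str.toList.foldl (fun d c =>
      match d.get? c with
      | some v => d.insert c (v + 1)
      | none   => d.insert c 1) PySem.Dict.empty
  let non_repeating_chars : List Char :=
    (count.items.filter (fun p => p.2 == 1)).map (·.1)
  if (non_repeating_chars.length : Int) < n then "None"
  else
    match PySem.List.pyGet? non_repeating_chars (n - 1) with
    | some c => String.ofList [c]
    | none   => ""   -- IndexError in Python: excluded by Pre_

-- ===== PORT B =====
-- The while loop over the shrinking string s, on its character list; `rest.replace(c, '')`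
-- for the single character c removes every occurrence of c, ported exactly as this purge.
def pvPurge (c : Char) (rest : List Char) : List Char :=
  rest.filter (fun d => !(d == c))

theorem pvPurge_length_le (c : Char) (rest : List Char) : (pvPurge c rest).length ≤ rest.length :=
  List.length_filter_le _ _

def pvUniqLoop (s : List Char) (uniq : List Char) : List Char :=
  match s with
  | [] => uniq
  | c :: rest =>
    if c ∈ rest then pvUniqLoop (pvPurge c rest) uniq
    else pvUniqLoop rest (uniq ++ [c])
termination_by s.length
decreasing_by
  · exact Nat.lt_succ_of_le (pvPurge_length_le c rest)
  · simp

def find_nth_non_repeating_char_alt (input_str : String) (n : Int) : String :=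
  let uniq : List Char := pvUniqLoop input_str.toList []
  if (uniq.length : Int) < n then "None"
  else
    match PySem.List.pyGet? uniq (n - 1) with
    | some c => String.ofList [c]
    | none   => ""   -- IndexError in Python: excluded by Pre_

-- ===== PRECONDITION & SPEC =====
-- number of characters occurring exactly once in the string (a property of the input, not a port)
def pvOnceCount (s : String) : Nat :=
  (s.toList.filter (fun c => s.toList.count c == 1)).length

-- Pre_ excludes exactly the inputs where both Pythons raise IndexError:
-- n ≤ 0 with fewer than 1-n once-only characters, so that index n-1 is out of range.
def Pre_find_nth_non_repeating_char (input_str : String) (n : Int) : Prop :=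
  1 - (pvOnceCount input_str : Int) ≤ n
instance (input_str : String) (n : Int) : Decidable (Pre_find_nth_non_repeating_char input_str n) := by
  unfold Pre_find_nth_non_repeating_char; infer_instance

def pvWitness_find_nth_non_repeating_char : String × Int := ("ab", 1)

def Spec_find_nth_non_repeating_char (input_str : String) (n : Int) (out : String) : Prop :=
  out = find_nth_non_repeating_char_alt input_str n
instance (input_str : String) (n : Int) (out : String) : Decidable (Spec_find_nth_non_repeating_char input_str n out) := by
  unfold Spec_find_nth_non_repeating_char; infer_instance

-- ===== CLAIM (what is proved, stated in full; the proofs are below) =====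
def Claim_equal_find_nth_non_repeating_char : Prop := ∀ (input_str : String) (n : Int), Dom_find_nth_non_repeating_char input_str n → Pre_find_nth_non_repeating_char input_str n → Spec_find_nth_non_repeating_char input_str n (find_nth_non_repeating_char input_str n)

-- ===== LEMMAS AND PROOFS =====

theorem pvCountFold_eq (s : List Char) :
    (s.foldl (fun d c =>
      match d.get? c with
      | some v => d.insert c (v + 1)
      | none   => d.insert c 1) (PySem.Dict.empty : PySem.Dict Char Int)) = PySem.Dict.counter s := by
  rw [← PySem.Dict.foldl_insert_getD_add_one_eq_counter]
  congr 1
  funext d c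
  cases h : d.get? c with
  | some v => simp [PySem.Dict.getD_eq_get?_getD, h]
  | none => simp [PySem.Dict.getD_eq_get?_getD, h]

-- A's comprehension over the counter's items is the once-only characters in first-occurrence order
theorem pvListA_eq (s : List Char) :
    (((PySem.Dict.counter s).items.filter (fun p => p.2 == 1)).map (·.1))
      = (PySem.List.dedup s).filter (fun c => s.count c == 1) := by
  rw [PySem.Dict.items_counter]
  rw [List.filter_map, List.map_map]
  have h1 : ((fun p : Char × Int => p.2 == 1) ∘ fun k => (k, (s.count k : Int))) = fun c => s.count c == 1 := by
    funext c; simp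
  rw [h1]
  have h2 : ((·.1 : Char × Int → Char) ∘ fun k : Char => (k, (s.count k : Int))) = id := by
    funext c; rfl
  rw [h2, List.map_id, PySem.List.dedup_eq_ofList]

-- ordered dedup commutes with filtering
theorem pvOfListFilter (p : Char → Bool) (xs : List Char) :
    PySem.Set.ofList (xs.filter p) = (PySem.Set.ofList xs).filter p := by
  induction xs with
  | nil => rfl
  | cons x xs ih =>
    by_cases hp : p x = true
    · rw [List.filter_cons_of_pos hp, PySem.Set.ofList_cons, PySem.Set.ofList_cons,
        PySem.Set.discard, PySem.Set.discard, ih, List.filter_cons_of_pos hp,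
        List.filter_filter, List.filter_filter]
      exact congrArg _ (List.filter_congr (fun y _ => by rw [Bool.and_comm]))
    · have hp' : p x = false := by simpa using hp
      rw [List.filter_cons_of_neg (by simp [hp']), PySem.Set.ofList_cons,
        List.filter_cons_of_neg (by simp [hp']), PySem.Set.discard, ih, List.filter_filter]
      apply List.filter_congr
      intro y _
      by_cases hyx : y = x
      · subst hyx; simp [hp']
      · simp [hyx]

-- B's elimination loop produces exactly the once-only characters in first-occurrence order
theorem pvUniqLoop_eq (s : List Char) (acc : List Char) :
    pvUniqLoop s acc = acc ++ (PySem.List.dedup s).filter (fun c => s.count c == 1) := by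
  induction hN : s.length using Nat.strong_induction_on generalizing s acc with
  | _ N ih =>
    match s with
    | [] => simp [pvUniqLoop]
    | c :: rest =>
      by_cases hmem : c ∈ rest
      · rw [pvUniqLoop, if_pos hmem,
          ih (pvPurge c rest).length (by
            rw [← hN]; exact Nat.lt_succ_of_le (pvPurge_length_le c rest)) _ acc rfl]
        congr 1
        rw [PySem.List.dedup_eq_ofList, PySem.List.dedup_eq_ofList, pvPurge, pvOfListFilter,
          PySem.Set.ofList_cons, PySem.Set.discard]
        have hc : ¬ ((c :: rest).count c == 1) = true := by
          have : 1 ≤ rest.count c := List.one_le_count_iff.mpr hmem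
          simp; omega
        rw [List.filter_cons_of_neg (by simpa using hc), List.filter_filter, List.filter_filter]
        apply List.filter_congr
        intro y hy
        by_cases hyc : y = c
        · subst hyc; simp
        · have hcnt1 : (rest.filter (fun d => !(d == c))).count y = rest.count y :=
            List.count_filter (by simp [hyc])
          have hcnt2 : (c :: rest).count y = rest.count y := by
            simp [List.count_cons]
            exact fun h => hyc h.symm
          simp [hcnt1, hcnt2]
      · rw [pvUniqLoop, if_neg hmem,
          ih rest.length (by rw [← hN]; exact Nat.lt_succ_self _) _ (acc ++ [c]) rfl,
          List.append_assoc]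
        congr 1
        rw [PySem.List.dedup_eq_ofList, PySem.List.dedup_eq_ofList, PySem.Set.ofList_cons,
          PySem.Set.discard]
        have hc : ((c :: rest).count c == 1) = true := by
          have h0 : rest.count c = 0 := List.count_eq_zero.mpr hmem
          simp [h0]
        simp only [List.filter_cons, List.filter_filter]
        rw [if_pos hc]
        simp only [List.singleton_append, List.cons.injEq, true_and]
        apply List.filter_congr
        intro y hy
        have hymem : y ∈ rest := by simpa using hy
        have hyc : y ≠ c := fun h => hmem (h ▸ hymem)
        have hcnt : (c :: rest).count y = rest.count y := by
          simp [List.count_cons]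
          exact fun h => hyc h.symm
        simp [hyc, hcnt]

-- ===== VERDICT (by name: the statement is the Claim_ definition above) =====
theorem find_nth_non_repeating_char_spec : Claim_equal_find_nth_non_repeating_char := by
  intro str n _ _
  unfold Spec_find_nth_non_repeating_char
  simp only [find_nth_non_repeating_char, find_nth_non_repeating_char_alt,
    pvCountFold_eq, pvListA_eq, pvUniqLoop_eq, List.nil_append]
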